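-- pv_equiv track=rewrite | github.com/root-11/root-11.github.io | static_page_generator/markdown_parser.py | list_of_items
-- ===== SOURCE A (Python) =====
-- def list_of_items(text):
--     """
--     turns:
--         - Coffee
--         - Tea
--         - Mile
--     into:
--         <ul>
--             <li>Coffee</li>
--             <li>Tea</li>
--             <li>Milk</li>
--         </ul>
--
--     :param text:
--     :return:
--     """
--     assert isinstance(text, str)
--     new_text = []
--     started = False
--     for line in text.split('\n'):
--         if line.startswith('- '):
--             if not started:
--                 started = True
--                 new_text.append("<ul>")
--
--             new_text.append(f"<li>{line[2:]}</li>")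
--         else:
--             if started:
--                 started = False
--                 new_text.append("</ul>")
--             new_text.append(line)
--
--     if started:  # the last item might be the end of the document.
--         new_text.append("</ul>")
--     return "\n".join(new_text)
-- ===== SOURCE B (Python) =====
-- def list_of_items(text):
--     """Group consecutive lines into runs (dash-run / plain-run) and wrap each
--     dash run in <ul>...</ul> in one two-level pass."""
--     assert isinstance(text, str)
--     lines = text.split('\n')
--     out = []
--     i = 0
--     n = len(lines)
--     while i < n:
--         line = lines[i]
--         if line.startswith('- '):
--             j = i + 1
--             while j < n and lines[j].startswith('- '):
--                 j += 1
--             out.append('<ul>')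
--             for m in lines[i:j]:
--                 out.append('<li>' + m[2:] + '</li>')
--             out.append('</ul>')
--         else:
--             j = i + 1
--             while j < n and not lines[j].startswith('- '):
--                 j += 1
--             out.extend(lines[i:j])
--         i = j
--     return '\n'.join(out)
-- ===== Notes on version B (the rewrite author's own statement) =====
-- stated objective: alternative
-- what changed: Replaces the running started-flag state machine with an explicit partition of the lines into maximal dash/plain runs (a two-level span-based pass), wrapping each dash run in <ul>...</ul> as a unit.
import Mathlib
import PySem

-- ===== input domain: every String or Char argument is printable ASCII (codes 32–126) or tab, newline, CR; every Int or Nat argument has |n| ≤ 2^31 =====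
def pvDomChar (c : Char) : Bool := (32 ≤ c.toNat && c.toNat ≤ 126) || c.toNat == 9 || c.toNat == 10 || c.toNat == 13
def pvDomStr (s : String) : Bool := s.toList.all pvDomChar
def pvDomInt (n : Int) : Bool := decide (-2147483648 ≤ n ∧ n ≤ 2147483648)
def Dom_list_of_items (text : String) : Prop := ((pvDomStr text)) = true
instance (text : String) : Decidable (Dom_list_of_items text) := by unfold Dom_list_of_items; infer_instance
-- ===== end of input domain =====

-- B groups lines into maximal dash/plain runs instead of A's started-flag state machine; same output.

-- ===== PORT A =====
-- A's loop body; state = (accumulated output lines, started flag)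
def pvStepA (st : List String × Bool) (line : String) : List String × Bool :=
  if PySem.Str.startswith line "- " then
    let acc := if !st.2 then st.1 ++ ["<ul>"] else st.1
    (acc ++ ["<li>" ++ PySem.Str.slice line (some 2) none ++ "</li>"], true)
  else
    let acc := if st.2 then st.1 ++ ["</ul>"] else st.1
    (acc ++ [line], false)

def list_of_items (text : String) : String :=
  let st := ((PySem.Str.split? text "\n").getD []).foldl pvStepA ([], false)
  PySem.Str.join "\n" (if st.2 then st.1 ++ ["</ul>"] else st.1)

-- ===== PORT B =====
def pvDash (line : String) : Bool := PySem.Str.startswith line "- "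

def pvLi (line : String) : String :=
  "<li>" ++ PySem.Str.slice line (some 2) none ++ "</li>"

-- B's grouping pass: take the maximal run sharing the head's key, emit it, recurse on the rest.
def pvGoB : List String → List String
  | [] => []
  | l :: ls =>
    if pvDash l then
      "<ul>" :: pvLi l ::
        ((ls.takeWhile pvDash).map pvLi ++ "</ul>" :: pvGoB (ls.dropWhile pvDash))
    else
      l :: (ls.takeWhile (fun x => !pvDash x) ++ pvGoB (ls.dropWhile (fun x => !pvDash x)))
termination_by ls => ls.length
decreasing_by
  · exact Nat.lt_succ_of_le (List.length_dropWhile_le _ _)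
  · exact Nat.lt_succ_of_le (List.length_dropWhile_le _ _)

def list_of_items_alt (text : String) : String :=
  PySem.Str.join "\n" (pvGoB ((PySem.Str.split? text "\n").getD []))

-- ===== PRECONDITION & SPEC =====
def Spec_list_of_items (text : String) (out : String) : Prop := out = list_of_items_alt text
instance (text : String) (out : String) : Decidable (Spec_list_of_items text out) := by unfold Spec_list_of_items; infer_instance

-- ===== CLAIM (what is proved, stated in full; the proofs are below) =====
def Claim_equal_list_of_items : Prop := ∀ (text : String), Dom_list_of_items text → Spec_list_of_items text (list_of_items text)

-- ===== LEMMAS AND PROOFS =====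

-- A's accumulator factors out of the fold.
theorem pvFoldA_factor (ls : List String) (acc : List String) (st : Bool) :
    ls.foldl pvStepA (acc, st) =
      (acc ++ (ls.foldl pvStepA ([], st)).1, (ls.foldl pvStepA ([], st)).2) := by
  induction ls generalizing acc st with
  | nil => simp
  | cons l ls ih =>
    simp only [List.foldl_cons]
    rw [ih, ih (pvStepA ([], st) l).1 (pvStepA ([], st) l).2]
    have : pvStepA (acc, st) l =
        (acc ++ (pvStepA ([], st) l).1, (pvStepA ([], st) l).2) := by
      simp [pvStepA]; split_ifs <;> simp
    rw [this]
    simp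

-- a run of dash lines, folded with the flag on, just appends its <li>s
theorem pvFoldA_dashRun (run rest : List String) (acc : List String)
    (h : ∀ l ∈ run, pvDash l = true) :
    (run ++ rest).foldl pvStepA (acc, true) =
      rest.foldl pvStepA (acc ++ run.map pvLi, true) := by
  induction run generalizing acc with
  | nil => simp
  | cons l run ih =>
    have hl : pvDash l = true := h l (by simp)
    simp only [List.cons_append, List.foldl_cons]
    have : pvStepA (acc, true) l = (acc ++ [pvLi l], true) := by
      simp [pvDash] at hl
      simp [pvStepA, pvLi, hl]
    rw [this, ih _ (fun x hx => h x (by simp [hx]))]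
    simp

-- a run of plain lines, folded with the flag off, just appends them
theorem pvFoldA_plainRun (run rest : List String) (acc : List String)
    (h : ∀ l ∈ run, pvDash l = false) :
    (run ++ rest).foldl pvStepA (acc, false) =
      rest.foldl pvStepA (acc ++ run, false) := by
  induction run generalizing acc with
  | nil => simp
  | cons l run ih =>
    have hl : pvDash l = false := h l (by simp)
    simp only [List.cons_append, List.foldl_cons]
    have : pvStepA (acc, false) l = (acc ++ [l], false) := by
      simp [pvDash] at hl
      simp [pvStepA, hl]
    rw [this, ih _ (fun x hx => h x (by simp [hx]))]
    simp

-- A's fold from the empty accumulator, with the trailing close appended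
def pvFinA (ls : List String) (st : Bool) : List String :=
  let r := ls.foldl pvStepA ([], st)
  if r.2 then r.1 ++ ["</ul>"] else r.1

-- finishing the fold from (acc, st) = acc ++ finishing from ([], st)
theorem pvFin_factor (ls : List String) (acc : List String) (st : Bool) :
    (if (ls.foldl pvStepA (acc, st)).2 then (ls.foldl pvStepA (acc, st)).1 ++ ["</ul>"]
     else (ls.foldl pvStepA (acc, st)).1) = acc ++ pvFinA ls st := by
  rw [pvFoldA_factor]
  simp only [pvFinA]
  split_ifs <;> simp

-- with the flag on and a non-dash (or absent) head, the fold first closes the <ul>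
theorem pvFinA_true (ls : List String)
    (h : ∀ l ∈ ls.head?, pvDash l = false) :
    pvFinA ls true = "</ul>" :: pvFinA ls false := by
  cases ls with
  | nil => simp [pvFinA]
  | cons l ls =>
    have hl : pvDash l = false := h l (by simp)
    simp [pvDash] at hl
    simp only [pvFinA, List.foldl_cons]
    have h1 : pvStepA (([] : List String), true) l = (["</ul>", l], false) := by
      simp [pvStepA, hl]
    have h2 : pvStepA (([] : List String), false) l = ([l], false) := by
      simp [pvStepA, hl]
    rw [h1, h2, pvFoldA_factor ls (["</ul>", l]) false, pvFoldA_factor ls [l] false]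
    split_ifs <;> simp

theorem pvFinA_eq_goB (ls : List String) : pvFinA ls false = pvGoB ls := by
  induction ls using pvGoB.induct with
  | case1 => simp [pvFinA, pvGoB]
  | case2 l ls hl ih =>
    rw [pvGoB, if_pos hl]
    simp only [pvFinA, List.foldl_cons]
    have hl' : PySem.Str.startswith l "- " = true := hl
    have h1 : pvStepA (([] : List String), false) l = (["<ul>", pvLi l], true) := by
      simp at hl'
      simp [pvStepA, pvLi, hl']
    rw [h1]
    have hsplit : ls = ls.takeWhile pvDash ++ ls.dropWhile pvDash :=
      (List.takeWhile_append_dropWhile (p := pvDash) (l := ls)).symm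
    conv_lhs => rw [hsplit]
    rw [pvFoldA_dashRun _ _ _ (fun x hx => List.mem_takeWhile_imp hx)]
    have hrest : ∀ l' ∈ (ls.dropWhile pvDash).head?, pvDash l' = false := by
      intro l' hl'
      have hh := List.head?_dropWhile_not pvDash ls
      cases hr : (ls.dropWhile pvDash).head? with
      | none => simp [hr] at hl'
      | some x =>
        simp [hr] at hl'
        subst hl'
        simpa [hr] using hh
    rw [pvFin_factor _ _ true, pvFinA_true _ hrest, ih]
    simp
  | case3 l ls hl ih =>
    rw [pvGoB, if_neg hl]
    have hl' : pvDash l = false := by simpa using hl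
    simp [pvDash] at hl'
    simp only [pvFinA, List.foldl_cons]
    have h1 : pvStepA (([] : List String), false) l = ([l], false) := by
      simp [pvStepA, hl']
    rw [h1]
    have hsplit : ls = ls.takeWhile (fun x => !pvDash x) ++ ls.dropWhile (fun x => !pvDash x) :=
      (List.takeWhile_append_dropWhile (p := fun x => !pvDash x) (l := ls)).symm
    conv_lhs => rw [hsplit]
    rw [pvFoldA_plainRun _ _ _ (fun x hx => by
      have := List.mem_takeWhile_imp hx; simpa using this)]
    rw [pvFin_factor _ _ false, ih]
    simp

-- ===== VERDICT =====
theorem list_of_items_spec : Claim_equal_list_of_items := by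
  intro text _
  show PySem.Str.join "\n" (pvFinA ((PySem.Str.split? text "\n").getD []) false) =
    list_of_items_alt text
  rw [pvFinA_eq_goB]
  rfl
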